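-- pv_equiv track=rewrite | github.com/asgeir/old-school-projects | python/verkefni1/birthdays.py | birthdays
-- ===== SOURCE A (Python) =====
-- def birthdays(lines):
--     days = {}
--     for line in lines.split('\n'):
--         line = line.strip()
--         people = days.setdefault(line[:4], [])
--         people.append(line)
--     for date in days.values():
--         date.sort()
--     grouped = [tuple(x) for x in days.values() if len(x) > 1]
--     grouped.sort()
--     return grouped
-- ===== SOURCE B (Python) =====
-- import itertools
--
-- def birthdays(lines):
--     items = sorted(l.strip() for l in lines.split('\n'))
--     grouped = []
--     for _, g in itertools.groupby(items, key=lambda s: s[:4]):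
--         run = tuple(g)
--         if len(run) > 1:
--             grouped.append(run)
--     return grouped
-- ===== Notes on version B (the rewrite author's own statement) =====
-- stated objective: simpler
-- what changed: A buckets lines into a dict keyed by the 4-char prefix, sorts each bucket, then sorts the list of groups; B sorts all stripped lines once and makes a single groupby pass over consecutive equal-prefix runs, so groups come out already internally sorted and in final order with no dict and no second sort.
import Mathlib
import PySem

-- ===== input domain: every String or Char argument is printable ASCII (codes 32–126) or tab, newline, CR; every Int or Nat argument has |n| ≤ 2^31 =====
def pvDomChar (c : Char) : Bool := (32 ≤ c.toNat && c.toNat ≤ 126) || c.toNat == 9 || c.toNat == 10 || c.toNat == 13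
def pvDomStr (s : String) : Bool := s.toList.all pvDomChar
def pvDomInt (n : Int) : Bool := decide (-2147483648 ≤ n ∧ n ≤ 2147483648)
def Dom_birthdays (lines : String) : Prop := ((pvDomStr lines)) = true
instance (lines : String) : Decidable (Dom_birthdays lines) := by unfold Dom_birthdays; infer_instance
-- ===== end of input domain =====

-- B replaces A's dict-of-buckets (plus a per-bucket sort and a final sort of the groups) by one
-- global sort of the stripped lines followed by a single groupby-style pass over consecutive
-- equal-prefix runs; objective: simpler (no dict, one sort, groups come out already ordered).

-- ===== PORT A =====
def birthdays (lines : String) : List (List String) :=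
  let days := ((PySem.Str.split? lines "\n").getD []).foldl
    (fun d l =>
      let line := PySem.Str.strip l
      d.modify (PySem.Str.slice line none (some 4)) [] (fun people => people ++ [line]))
    PySem.Dict.empty
  -- for date in days.values(): date.sort()
  let vals := days.values.map (fun v => PySem.List.sorted v (fun x => x))
  let grouped := vals.filter (fun x => decide (1 < x.length))
  PySem.List.sorted grouped (fun x => x)

-- ===== PORT B =====
-- key=lambda s: s[:4]
def pvKey (s : String) : String := PySem.Str.slice s none (some 4)

-- port of itertools.groupby(·, key): split a list into maximal consecutive runs of equal key
def pvGroupBy (key : String → String) : List String → List (List String)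
  | [] => []
  | x :: xs =>
    match pvGroupBy key xs with
    | (y :: r) :: rest =>
      if key x == key y then (x :: y :: r) :: rest else [x] :: (y :: r) :: rest
    | _ => [[x]]

def birthdays_alt (lines : String) : List (List String) :=
  let items := PySem.List.sorted (((PySem.Str.split? lines "\n").getD []).map PySem.Str.strip) (fun s => s)
  (pvGroupBy pvKey items).filter (fun r => decide (1 < r.length))

-- ===== PRECONDITION & SPEC =====
def Spec_birthdays (lines : String) (out : List (List String)) : Prop := out = birthdays_alt lines
instance (lines : String) (out : List (List String)) : Decidable (Spec_birthdays lines out) := by unfold Spec_birthdays; infer_instance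

-- ===== CLAIM (what is proved, stated in full; the proofs are below) =====
def Claim_equal_birthdays : Prop := ∀ (lines : String), Dom_birthdays lines → Spec_birthdays lines (birthdays lines)

-- ===== LEMMAS AND PROOFS =====

-- PySem.List.sorted does not depend on which DecidableLT instance elaboration picked
theorem pv_sorted_congr {α κ : Type} [LT κ] (i1 i2 : DecidableLT κ) (xs : List α) (key : α → κ) :
    @PySem.List.sorted α κ _ i1 xs key false = @PySem.List.sorted α κ _ i2 xs key false := by
  cases Subsingleton.elim i1 i2; rfl

-- truncation is monotone for the lexicographic order on char lists
theorem pv_take_lt : ∀ {n : Nat} {a b : List Char}, a.take n < b.take n → a < b := by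
  intro n
  induction n with
  | zero => intro a b h; simp at h
  | succ m ih =>
    intro a b h
    match a, b with
    | [], [] => simp at h
    | [], c :: b => exact List.nil_lt_cons _ _
    | c :: a, [] => simp at h
    | c :: a, d :: b =>
      simp only [List.take_succ_cons, List.cons_lt_cons_iff] at h ⊢
      rcases h with h | ⟨rfl, h⟩
      · exact Or.inl h
      · exact Or.inr ⟨rfl, ih h⟩

theorem pvKey_toList (a : String) : (pvKey a).toList = a.toList.take 4 := by
  simp [pvKey, pysem]

-- s[:4] is monotone: a strictly smaller 4-prefix forces a strictly smaller string …
theorem pvKey_lt {a b : String} (h : pvKey a < pvKey b) : a < b := by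
  rw [String.lt_iff_toList_lt] at h ⊢
  rw [pvKey_toList, pvKey_toList] at h
  exact pv_take_lt h

-- … and a ≤ b forces pvKey a ≤ pvKey b
theorem pvKey_le {a b : String} (h : a ≤ b) : pvKey a ≤ pvKey b := by
  by_contra hc
  rw [not_le] at hc
  exact absurd (pvKey_lt hc) (not_lt.mpr h)

-- invariant of pvGroupBy on a sorted input: runs concatenate back to the input, are nonempty,
-- have a constant key, and their keys strictly increase
def pvGB (xs : List String) (runs : List (List String)) : Prop :=
  runs.flatten = xs ∧ (∀ r ∈ runs, r ≠ []) ∧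
  (∀ r ∈ runs, ∀ a ∈ r, pvKey a = pvKey r.headI) ∧
  (runs.map (fun r => pvKey r.headI)).Pairwise (· < ·)

theorem pv_gb_sorted (xs : List String) (h : xs.Pairwise (· ≤ ·)) :
    pvGB xs (pvGroupBy pvKey xs) := by
  induction xs with
  | nil => simp [pvGroupBy, pvGB]
  | cons x xs ih =>
    obtain ⟨hx, hxs⟩ := List.pairwise_cons.mp h
    have IH := ih hxs
    show pvGB (x :: xs) (pvGroupBy pvKey (x :: xs))
    rw [pvGroupBy]
    cases hr : pvGroupBy pvKey xs with
    | nil =>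
      have hxe : xs = [] := by
        have := IH.1; rw [hr] at this; simpa using this.symm
      subst hxe
      simp [pvGB]
    | cons r rest =>
      rw [hr] at IH
      obtain ⟨hflat, hne, hconst, hpw⟩ := IH
      cases r with
      | nil => exact absurd rfl (hne [] (by simp))
      | cons y t =>
        show pvGB (x :: xs)
          (if (pvKey x == pvKey y) = true then (x :: y :: t) :: rest else [x] :: (y :: t) :: rest)
        cases hk : (pvKey x == pvKey y) with
        | true =>
          rw [if_pos rfl]
          have hxy : pvKey x = pvKey y := eq_of_beq hk
          refine ⟨by simpa using hflat, ?_, ?_, ?_⟩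
          · intro r hr'
            rcases List.mem_cons.mp hr' with rfl | hr'
            · simp
            · exact hne _ (List.mem_cons_of_mem _ hr')
          · intro r hr' a ha
            rcases List.mem_cons.mp hr' with rfl | hr'
            · rcases List.mem_cons.mp ha with rfl | ha
              · rfl
              · have := hconst (y :: t) (List.mem_cons_self) a ha
                show pvKey a = pvKey x
                rw [hxy]; exact this
            · exact hconst r (List.mem_cons_of_mem _ hr') a ha
          · simp only [List.map_cons] at hpw ⊢
            have h1 : (x :: y :: t).headI = x := rfl
            have h2 : (y :: t).headI = y := rfl
            rw [h1, hxy]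
            rw [h2] at hpw
            exact hpw
        | false =>
          rw [if_neg (by simp)]
          have hymem : y ∈ xs := by
            have hy : y ∈ ((y :: t) :: rest).flatten := by simp
            rw [hflat] at hy; exact hy
          have hklt : pvKey x < pvKey y :=
            lt_of_le_of_ne (pvKey_le (hx y hymem))
              (by intro hcon; rw [hcon] at hk; simp at hk)
          refine ⟨by simpa using hflat, ?_, ?_, ?_⟩
          · intro r hr'
            rcases List.mem_cons.mp hr' with rfl | hr'
            · simp
            · exact hne _ hr'
          · intro r hr' a ha
            rcases List.mem_cons.mp hr' with rfl | hr'
            · rcases List.mem_cons.mp ha with rfl | ha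
              · rfl
              · simp at ha
            · exact hconst r hr' a ha
          · rw [List.map_cons, List.pairwise_cons]
            refine ⟨?_, hpw⟩
            intro k hkmem
            rcases List.mem_map.mp hkmem with ⟨r', hr', rfl⟩
            rcases List.mem_cons.mp hr' with rfl | hr'
            · exact hklt
            · have := (List.pairwise_cons.mp hpw).1 (pvKey r'.headI)
                (List.mem_map.mpr ⟨r', hr', rfl⟩)
              exact lt_trans hklt this

-- a run list satisfying the invariant is exactly "filter by each run key"
theorem pv_runs_eq : ∀ (runs : List (List String)) (xs : List String), pvGB xs runs →
    runs = (runs.map (fun r => pvKey r.headI)).map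
      (fun k => xs.filter (fun s => pvKey s == k)) := by
  intro runs
  induction runs with
  | nil => intro xs _; simp
  | cons r rest ih =>
    intro xs h
    obtain ⟨hflat, hne, hconst, hpw⟩ := h
    have hxs : xs = r ++ rest.flatten := by rw [← hflat]; simp
    rw [List.map_cons] at hpw
    obtain ⟨hpw1, hpw2⟩ := List.pairwise_cons.mp hpw
    have hkr : ∀ a ∈ r, pvKey a = pvKey r.headI := hconst r List.mem_cons_self
    have hlt : ∀ r' ∈ rest, pvKey r.headI < pvKey r'.headI := by
      intro r' hr'
      exact hpw1 _ (List.mem_map.mpr ⟨r', hr', rfl⟩)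
    have hrestkey : ∀ a ∈ rest.flatten, pvKey r.headI < pvKey a := by
      intro a ha
      rcases List.mem_flatten.mp ha with ⟨r', hr', har⟩
      rw [hconst r' (List.mem_cons_of_mem _ hr') a har]
      exact hlt r' hr'
    simp only [List.map_cons]
    refine List.cons_eq_cons.mpr ⟨?_, ?_⟩
    · -- r = xs.filter (== pvKey r.headI)
      rw [hxs, List.filter_append]
      have h1 : r.filter (fun s => pvKey s == pvKey r.headI) = r :=
        List.filter_eq_self.mpr (fun a ha => beq_iff_eq.mpr (hkr a ha))
      have h2 : rest.flatten.filter (fun s => pvKey s == pvKey r.headI) = [] :=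
        List.filter_eq_nil_iff.mpr (fun a ha => by
          simp only [beq_iff_eq]
          exact fun hcon => absurd hcon.symm (ne_of_lt (hrestkey a ha)))
      rw [h1, h2, List.append_nil]
    · -- tail
      have hGB : pvGB rest.flatten rest := by
        refine ⟨rfl, fun r' hr' => hne r' (List.mem_cons_of_mem _ hr'),
          fun r' hr' => hconst r' (List.mem_cons_of_mem _ hr'), hpw2⟩
      conv_lhs => rw [ih rest.flatten hGB]
      apply List.map_congr_left
      intro k hk
      rcases List.mem_map.mp hk with ⟨r', hr', rfl⟩
      rw [hxs, List.filter_append]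
      have h0 : r.filter (fun s => pvKey s == pvKey r'.headI) = [] :=
        List.filter_eq_nil_iff.mpr (fun a ha => by
          simp only [beq_iff_eq]
          rw [hkr a ha]
          exact ne_of_lt (hlt r' hr'))
      rw [h0, List.nil_append]

theorem pv_gb_mem (runs : List (List String)) (xs : List String) (h : pvGB xs runs) (k : String) :
    k ∈ runs.map (fun r => pvKey r.headI) ↔ k ∈ xs.map pvKey := by
  obtain ⟨hflat, hne, hconst, hpw⟩ := h
  constructor
  · intro hk
    rcases List.mem_map.mp hk with ⟨r, hr, rfl⟩
    have hhead : r.headI ∈ r := by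
      cases r with
      | nil => exact absurd rfl (hne _ hr)
      | cons a t => exact List.mem_cons_self
    exact List.mem_map.mpr ⟨r.headI, by rw [← hflat]; exact List.mem_flatten.mpr ⟨r, hr, hhead⟩, rfl⟩
  · intro hk
    rcases List.mem_map.mp hk with ⟨a, ha, rfl⟩
    rw [← hflat] at ha
    rcases List.mem_flatten.mp ha with ⟨r, hr, har⟩
    exact List.mem_map.mpr ⟨r, hr, (hconst r hr a har).symm⟩

theorem pv_gb_nodup (runs : List (List String)) (xs : List String) (h : pvGB xs runs) :
    (runs.map (fun r => pvKey r.headI)).Nodup :=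
  h.2.2.2.imp (fun hlt => ne_of_lt hlt)

-- filtering commutes with sorting (identity key)
theorem pv_sorted_filter (L : List String) (p : String → Bool) :
    PySem.List.sorted (L.filter p) (fun s => s) = (PySem.List.sorted L (fun s => s)).filter p :=
  PySem.List.sorted_id_eq_of_perm_of_pairwise _ _
    (List.Perm.filter p (PySem.List.sorted_perm L (fun s => s) false))
    ((PySem.List.sorted_pairwise L (fun s => s)).filter p)

-- the whole equivalence, for an arbitrary list 'raw' of split lines
theorem pv_main (raw : List String) :
    (let days := raw.foldl
      (fun d l => PySem.Dict.modify d (PySem.Str.slice (PySem.Str.strip l) none (some 4)) []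
        (fun people => people ++ [PySem.Str.strip l])) PySem.Dict.empty
    PySem.List.sorted
      ((days.values.map (fun v => PySem.List.sorted v (fun x => x))).filter
        (fun x => decide (1 < x.length))) (fun x => x))
    = (pvGroupBy pvKey (PySem.List.sorted (raw.map PySem.Str.strip) (fun s => s))).filter
        (fun r => decide (1 < r.length)) := by
  show PySem.List.sorted
      (((raw.foldl
      (fun d l => PySem.Dict.modify d (pvKey (PySem.Str.strip l)) []
        (fun people => people ++ [PySem.Str.strip l])) PySem.Dict.empty).values.map
          (fun v => PySem.List.sorted v (fun x => x))).filter
        (fun x => decide (1 < x.length))) (fun x => x)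
    = (pvGroupBy pvKey (PySem.List.sorted (raw.map PySem.Str.strip) (fun s => s))).filter
        (fun r => decide (1 < r.length))
  set L : List String := raw.map PySem.Str.strip with hL
  set d : PySem.Dict String (List String) := raw.foldl
      (fun d l => PySem.Dict.modify d (pvKey (PySem.Str.strip l)) []
        (fun people => people ++ [PySem.Str.strip l])) PySem.Dict.empty with hd
  set items : List String := PySem.List.sorted L (fun s => s) with hitems
  set runs : List (List String) := pvGroupBy pvKey items with hruns0
  -- dict keys
  have hnodup : d.keys.Nodup := by
    rw [hd]
    exact PySem.Dict.nodup_keys_foldl_modify_key raw (fun l => pvKey (PySem.Str.strip l)) []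
      (fun d x v => v ++ [PySem.Str.strip x]) PySem.Dict.empty List.nodup_nil
  have hkeys : d.keys = PySem.Set.ofList (L.map pvKey) := by
    rw [hd]
    rw [PySem.Dict.keys_foldl_modify_key raw (fun l => pvKey (PySem.Str.strip l)) []
      (fun d x v => v ++ [PySem.Str.strip x]) PySem.Dict.empty]
    rw [hL, List.map_map]
    rfl
  -- dict buckets
  have hgetD : ∀ k, d.getD k [] = L.filter (fun s => pvKey s == k) := by
    intro k
    have hshape : d = (raw.map (fun l => (pvKey (PySem.Str.strip l), PySem.Str.strip l))).foldl
        (fun d p => d.modify p.1 [] (fun x => x ++ [p.2])) PySem.Dict.empty := by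
      rw [hd, List.foldl_map]
    rw [hshape, PySem.Dict.getD_foldl_modify_append]
    rw [List.filter_map, List.map_map, hL, List.filter_map]
    rfl
  have hvals : d.values = d.keys.map (fun k => d.getD k []) :=
    PySem.Dict.values_eq_map_keys d hnodup []
  -- B side structure
  have hpw : items.Pairwise (· ≤ ·) := PySem.List.sorted_pairwise L (fun s => s)
  have hGB : pvGB items runs := pv_gb_sorted items hpw
  have hne := hGB.2.1
  have hbucket : ∀ k, PySem.List.sorted (L.filter (fun s => pvKey s == k)) (fun s => s)
      = items.filter (fun s => pvKey s == k) := fun k => by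
    rw [pv_sorted_filter, ← hitems]
  have hruns : runs = (runs.map (fun r => pvKey r.headI)).map
      (fun k => PySem.List.sorted (L.filter (fun s => pvKey s == k)) (fun s => s)) := by
    conv_lhs => rw [pv_runs_eq runs items hGB]
    exact (List.map_congr_left (fun k _ => hbucket k)).symm
  have hperm : (runs.map (fun r => pvKey r.headI)).Perm (PySem.Set.ofList (L.map pvKey)) := by
    rw [List.perm_ext_iff_of_nodup (pv_gb_nodup runs items hGB) (PySem.Set.nodup_ofList _)]
    intro k
    rw [pv_gb_mem runs items hGB k, PySem.Set.mem_ofList]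
    exact List.Perm.mem_iff (List.Perm.map pvKey (PySem.List.sorted_perm L (fun s => s) false))
  -- runs are pairwise ≤
  have hrle : runs.Pairwise (· ≤ ·) := by
    apply List.Pairwise.imp_of_mem (R := fun r1 r2 => pvKey r1.headI < pvKey r2.headI)
    · intro r1 r2 h1 h2 hlt
      obtain ⟨a, t1, rfl⟩ := List.exists_cons_of_ne_nil (hne r1 h1)
      obtain ⟨b, t2, rfl⟩ := List.exists_cons_of_ne_nil (hne r2 h2)
      exact le_of_lt (List.Lex.rel (pvKey_lt hlt))
    · exact List.pairwise_map.mp hGB.2.2.2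
  -- final assembly
  have hmap : d.values.map (fun v => PySem.List.sorted v (fun x => x))
      = (PySem.Set.ofList (L.map pvKey)).map
          (fun k => PySem.List.sorted (L.filter (fun s => pvKey s == k)) (fun x => x)) := by
    rw [hvals, hkeys, List.map_map]
    exact List.map_congr_left (fun k _ => by simp only [Function.comp_apply, hgetD k])
  rw [hmap]
  refine (pv_sorted_congr _ (@LinearOrder.toDecidableLT _ inferInstance) _ _).trans ?_
  apply PySem.List.sorted_id_eq_of_perm_of_pairwise
  · refine List.Perm.filter _ ?_
    conv_lhs => rw [hruns]
    exact List.Perm.map _ hperm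
  · exact List.Pairwise.filter _ hrle


-- ===== VERDICT (by name: the statement is the Claim_ definition above) =====
theorem birthdays_spec : Claim_equal_birthdays := by
  intro lines _
  show birthdays lines = birthdays_alt lines
  unfold birthdays birthdays_alt
  exact pv_main ((PySem.Str.split? lines "\n").getD [])
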